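-- pv_equiv track=rewrite | github.com/expertanalytics/bot-api | bot_api/commands.py | get_unique_shorthand
-- ===== SOURCE A (Python) =====
-- def get_unique_shorthand(i: int, key: str, short_keys: str, long_keys: str):
--     """Gets the shortest sub-string of 'key' that is not in either 'long_keys' or 'short_keys'."""
--
--     if i >= len(key):
--         return key
--
--     sh = key[:i]
--
--     if sh in long_keys:
--         return key
--
--     if sh in short_keys or sh in long_keys:
--         return get_unique_shorthand(i + 1, key, short_keys, long_keys)
--
--     return sh
-- ===== SOURCE B (Python) =====
-- def get_unique_shorthand(i: int, key: str, short_keys: str, long_keys: str):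
--     """Gets the shortest sub-string of 'key' that is not in either 'long_keys' or 'short_keys'."""
--     n = len(key)
--     j = i
--     while j < n and key[:j] in short_keys and key[:j] not in long_keys:
--         j += 1
--     if j >= n:
--         return key
--     sh = key[:j]
--     return key if sh in long_keys else sh
-- ===== Notes on version B (the rewrite author's own statement) =====
-- stated objective: alternative
-- what changed: A's tail recursion with three interleaved returns is replaced by a scan-then-decide decomposition: a while loop that only advances the index j while key[:j] is in short_keys and not in long_keys, followed by one post-loop return decision.
import Mathlib
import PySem

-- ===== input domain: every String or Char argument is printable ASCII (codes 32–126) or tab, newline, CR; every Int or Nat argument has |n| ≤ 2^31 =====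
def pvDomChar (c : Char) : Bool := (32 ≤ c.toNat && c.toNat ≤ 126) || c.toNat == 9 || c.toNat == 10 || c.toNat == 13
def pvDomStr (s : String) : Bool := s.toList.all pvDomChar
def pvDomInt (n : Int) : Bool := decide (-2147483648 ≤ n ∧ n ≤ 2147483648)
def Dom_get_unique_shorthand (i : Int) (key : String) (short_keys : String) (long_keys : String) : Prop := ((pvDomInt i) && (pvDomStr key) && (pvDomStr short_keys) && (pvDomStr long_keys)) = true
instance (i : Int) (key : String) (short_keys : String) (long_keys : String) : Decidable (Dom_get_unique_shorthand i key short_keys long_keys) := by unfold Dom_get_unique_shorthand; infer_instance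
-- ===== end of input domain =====

-- B replaces A's tail recursion by a scan-then-decide decomposition: a while loop only advances the index j, and the single return decision is made once after the loop.

-- ===== PORT A =====
-- literal port of A's tail recursion on i
def get_unique_shorthand (i : Int) (key : String) (short_keys : String) (long_keys : String) : String :=
  if (PySem.Str.len key : Int) ≤ i then key
  else
    let sh := PySem.Str.slice key none (some i)
    if PySem.Str.isIn sh long_keys then key
    else if PySem.Str.isIn sh short_keys || PySem.Str.isIn sh long_keys then
      get_unique_shorthand (i + 1) key short_keys long_keys
    else sh
termination_by ((PySem.Str.len key : Int) - i).toNat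
decreasing_by omega

-- ===== PORT B =====
-- B's while loop: advance j while key[:j] is in short_keys and not in long_keys
def pvScan (key : String) (short_keys : String) (long_keys : String) (j : Int) : Int :=
  if j < (PySem.Str.len key : Int) ∧
      PySem.Str.isIn (PySem.Str.slice key none (some j)) short_keys ∧
      ¬ PySem.Str.isIn (PySem.Str.slice key none (some j)) long_keys then
    pvScan key short_keys long_keys (j + 1)
  else j
termination_by ((PySem.Str.len key : Int) - j).toNat
decreasing_by omega

def get_unique_shorthand_alt (i : Int) (key : String) (short_keys : String) (long_keys : String) : String :=
  let j := pvScan key short_keys long_keys i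
  if (PySem.Str.len key : Int) ≤ j then key
  else
    let sh := PySem.Str.slice key none (some j)
    if PySem.Str.isIn sh long_keys then key else sh

-- ===== PRECONDITION & SPEC =====
def Spec_get_unique_shorthand (i : Int) (key : String) (short_keys : String) (long_keys : String) (out : String) : Prop := out = get_unique_shorthand_alt i key short_keys long_keys
instance (i : Int) (key : String) (short_keys : String) (long_keys : String) (out : String) : Decidable (Spec_get_unique_shorthand i key short_keys long_keys out) := by unfold Spec_get_unique_shorthand; infer_instance

-- ===== CLAIM (what is proved, stated in full; the proofs are below) =====
def Claim_equal_get_unique_shorthand : Prop := ∀ (i : Int) (key : String) (short_keys : String) (long_keys : String), Dom_get_unique_shorthand i key short_keys long_keys → Spec_get_unique_shorthand i key short_keys long_keys (get_unique_shorthand i key short_keys long_keys)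

-- ===== LEMMAS AND PROOFS =====
theorem pv_main (key short_keys long_keys : String) (i : Int) :
    get_unique_shorthand i key short_keys long_keys =
      get_unique_shorthand_alt i key short_keys long_keys := by
  rw [get_unique_shorthand, get_unique_shorthand_alt, pvScan]
  by_cases h : ((PySem.Str.len key : Int)) ≤ i
  · have hnot : ¬ (i < (PySem.Str.len key : Int) ∧
        PySem.Str.isIn (PySem.Str.slice key none (some i)) short_keys = true ∧
        ¬ PySem.Str.isIn (PySem.Str.slice key none (some i)) long_keys = true) := by
      intro hc; omega
    rw [if_neg hnot, if_pos h, if_pos h]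
  · by_cases hL : PySem.Str.isIn (PySem.Str.slice key none (some i)) long_keys
    · have hnot : ¬ (i < (PySem.Str.len key : Int) ∧
          PySem.Str.isIn (PySem.Str.slice key none (some i)) short_keys = true ∧
          ¬ PySem.Str.isIn (PySem.Str.slice key none (some i)) long_keys = true) := by
        intro hc; exact hc.2.2 hL
      rw [if_neg hnot, if_neg h, if_pos hL, if_neg h, if_pos hL]
    · by_cases hS : PySem.Str.isIn (PySem.Str.slice key none (some i)) short_keys
      · have hc : i < (PySem.Str.len key : Int) ∧
            PySem.Str.isIn (PySem.Str.slice key none (some i)) short_keys = true ∧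
            ¬ PySem.Str.isIn (PySem.Str.slice key none (some i)) long_keys = true :=
          ⟨lt_of_not_ge h, hS, fun hh => hL hh⟩
        have hor : (PySem.Str.isIn (PySem.Str.slice key none (some i)) short_keys ||
            PySem.Str.isIn (PySem.Str.slice key none (some i)) long_keys) = true := by
          rw [Bool.or_eq_true]; exact Or.inl hS
        rw [if_pos hc, if_neg h, if_neg hL, if_pos hor,
          pv_main key short_keys long_keys (i + 1), get_unique_shorthand_alt]
      · have hnot : ¬ (i < (PySem.Str.len key : Int) ∧
            PySem.Str.isIn (PySem.Str.slice key none (some i)) short_keys = true ∧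
            ¬ PySem.Str.isIn (PySem.Str.slice key none (some i)) long_keys = true) := by
          intro hc; exact hS hc.2.1
        have hor : ¬ (PySem.Str.isIn (PySem.Str.slice key none (some i)) short_keys ||
            PySem.Str.isIn (PySem.Str.slice key none (some i)) long_keys) = true := by
          rw [Bool.or_eq_true]; rintro (hh | hh) <;> [exact hS hh; exact hL hh]
        rw [if_neg hnot, if_neg h, if_neg hL, if_neg hor, if_neg h, if_neg hL]
termination_by ((PySem.Str.len key : Int) - i).toNat
decreasing_by omega

-- ===== VERDICT (by name: the statement is the Claim_ definition above) =====
theorem get_unique_shorthand_spec : Claim_equal_get_unique_shorthand := by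
  intro i key short_keys long_keys _
  exact pv_main key short_keys long_keys i
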